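-- pv_equiv track=rewrite | github.com/tghaines/smscores | scraper_web_v3.py | recommend_channel
-- ===== SOURCE A (Python) =====
-- def recommend_channel(channel_usage):
--     """Recommend the best non-overlapping channel (1, 6, or 11)."""
--     best_channels = [1, 6, 11]
--     scores = {}
--     for ch in best_channels:
--         # Count networks on this channel and overlapping channels
--         count = 0
--         total_signal = 0
--         for scan_ch, networks in channel_usage.items():
--             # Channels overlap if within 4 of each other (2.4GHz)
--             if abs(scan_ch - ch) <= 4:
--                 count += len(networks)
--                 total_signal += sum(n['signal'] for n in networks)
--         scores[ch] = (count, total_signal)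
--     # Pick the channel with fewest networks, then lowest total signal
--     return min(best_channels, key=lambda c: scores[c])
-- ===== SOURCE B (Python) =====
-- def recommend_channel(channel_usage):
--     """Recommend the best non-overlapping channel (1, 6, or 11)."""
--     # Stage 1: one aggregation pass - per scanned channel, its network count and signal total.
--     agg = {}
--     for scan_ch, networks in channel_usage.items():
--         agg[scan_ch] = (len(networks), sum(n['signal'] for n in networks))
--     # Stage 2: each candidate's score is a windowed lookup over the 9 overlapping channels.
--     triples = []
--     for ch in (1, 6, 11):
--         count = 0
--         sig = 0
--         for c in range(ch - 4, ch + 5):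
--             cnt_c, sig_c = agg.get(c, (0, 0))
--             count += cnt_c
--             sig += sig_c
--         triples.append((count, sig, ch))
--     # Lexicographic min on (count, signal, channel); channel last breaks ties toward 1 < 6 < 11.
--     return min(triples)[2]
-- ===== Notes on version B (the rewrite author's own statement) =====
-- stated objective: alternative
-- what changed: A scans the whole channel_usage dict once per candidate channel with an abs-distance filter and picks min by a key function; B first builds an aggregate dict (count, signal total) per scanned channel in one pass, then scores each candidate by nine direct dict lookups over its overlap window range(ch-4, ch+5), and selects via a lexicographic min over (count, signal, channel) triples.
-- outside the precondition, e.g. on recommend_channel({100: [{}]}): A returns 1, B raises KeyError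
import Mathlib
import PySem

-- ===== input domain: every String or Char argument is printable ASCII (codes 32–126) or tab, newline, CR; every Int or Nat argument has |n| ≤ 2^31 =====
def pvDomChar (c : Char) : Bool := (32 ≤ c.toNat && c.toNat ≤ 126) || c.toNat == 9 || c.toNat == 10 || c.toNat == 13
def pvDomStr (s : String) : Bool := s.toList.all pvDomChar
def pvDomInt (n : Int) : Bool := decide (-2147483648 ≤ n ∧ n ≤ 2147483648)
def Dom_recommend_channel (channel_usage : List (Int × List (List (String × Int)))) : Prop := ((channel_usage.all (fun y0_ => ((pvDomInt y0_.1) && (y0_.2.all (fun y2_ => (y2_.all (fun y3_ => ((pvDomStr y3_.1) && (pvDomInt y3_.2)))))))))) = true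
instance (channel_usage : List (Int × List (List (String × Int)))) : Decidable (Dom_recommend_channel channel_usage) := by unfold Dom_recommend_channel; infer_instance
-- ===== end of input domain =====

-- B replaces A's three abs-filtered scans + min-by-key by a different pipeline: one aggregation
-- pass into a per-channel dict, then nine windowed dict lookups per candidate and a lexicographic
-- min over (count, signal, channel) triples; alternative decomposition, same exact result.


-- signal sum of one network list: sum(n['signal'] for n in networks); n['signal'] is a dict
-- lookup (first match in the association list); getD 0 is only reached outside Pre_
def sumSignal (networks : List (List (String × Int))) : Int :=
  networks.foldl (fun s n => s + ((n.lookup "signal").getD 0)) 0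

-- ===== PORT A =====
-- one scan of channel_usage per candidate channel ch, filtered by abs(scan_ch - ch) <= 4
def scoreFor (channel_usage : List (Int × List (List (String × Int)))) (ch : Int) : Int × Int :=
  channel_usage.foldl
    (fun acc p =>
      if |p.1 - ch| ≤ 4 then (acc.1 + (p.2.length : Int), acc.2 + sumSignal p.2) else acc)
    (0, 0)

-- min(best_channels, key=lambda c: scores[c]): first strictly-smaller tuple wins (lex order)
def lexLt (a b : Int × Int) : Bool := a.1 < b.1 || (a.1 == b.1 && a.2 < b.2)

def pickMin (s1 s6 s11 : Int × Int) : Int :=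
  let b := if lexLt s6 s1 then (6, s6) else (1, s1)
  if lexLt s11 b.2 then 11 else b.1

def recommend_channel (channel_usage : List (Int × List (List (String × Int)))) : Int :=
  pickMin (scoreFor channel_usage 1) (scoreFor channel_usage 6) (scoreFor channel_usage 11)

-- ===== PORT B =====
-- stage 1: aggregate (count, signal total) per scanned channel into a dict, one pass
def aggOf (channel_usage : List (Int × List (List (String × Int)))) :
    PySem.Dict Int (Int × Int) :=
  channel_usage.foldl
    (fun d p => d.insert p.1 ((p.2.length : Int), sumSignal p.2)) PySem.Dict.empty

-- stage 2: a candidate's score = sum of agg.get(c, (0,0)) over its window range(ch-4, ch+5)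
def windowScore (agg : PySem.Dict Int (Int × Int)) (ch : Int) : Int × Int :=
  (PySem.List.pyRange (ch - 4) (ch + 5) 1).foldl
    (fun s c =>
      let v := agg.getD c (0, 0)
      (s.1 + v.1, s.2 + v.2))
    (0, 0)

-- Python's tuple '<' on (count, sig, ch) triples (lexicographic); min(triples) keeps the first
-- minimum = fold replacing the current best only on strict '<'
def lex3Lt (a b : Int × Int × Int) : Bool :=
  a.1 < b.1 || (a.1 == b.1 && (a.2.1 < b.2.1 || (a.2.1 == b.2.1 && a.2.2 < b.2.2)))

def recommend_channel_alt (channel_usage : List (Int × List (List (String × Int)))) : Int :=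
  let agg := aggOf channel_usage
  let s1 := windowScore agg 1
  let s6 := windowScore agg 6
  let s11 := windowScore agg 11
  let t1 : Int × Int × Int := (s1.1, s1.2, 1)
  let t6 : Int × Int × Int := (s6.1, s6.2, 6)
  let t11 : Int × Int × Int := (s11.1, s11.2, 11)
  -- min([t1, t6, t11]) unrolled: keep the current best, replace on strict lexicographic '<'
  let m := if lex3Lt t6 t1 then t6 else t1
  let m := if lex3Lt t11 m then t11 else m
  m.2.2

-- ===== PRECONDITION & SPEC =====
-- Pre_ (i) requires distinct scan-channel keys — channel_usage models a Python dict, which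
-- cannot hold duplicate keys — and (ii) excludes inputs where some network dict lacks the
-- 'signal' key: Python B always raises KeyError there, and Python A raises too unless every
-- offending network sits on a channel overlapping no candidate (that corner is excluded
-- because B's aggregation pass naturally raises there).
def Pre_recommend_channel (channel_usage : List (Int × List (List (String × Int)))) : Prop :=
  (channel_usage.map Prod.fst).Nodup ∧
  ∀ p ∈ channel_usage, ∀ n ∈ p.2, (n.lookup "signal").isSome = true
instance (channel_usage : List (Int × List (List (String × Int)))) : Decidable (Pre_recommend_channel channel_usage) := by unfold Pre_recommend_channel; infer_instance

def pvWitness_recommend_channel : (List (Int × List (List (String × Int)))) :=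
  [(1, [[("signal", -40)], [("signal", -70)]]), (6, []), (9, [[("signal", -30)]])]

def Spec_recommend_channel (channel_usage : List (Int × List (List (String × Int)))) (out : Int) : Prop := out = recommend_channel_alt channel_usage
instance (channel_usage : List (Int × List (List (String × Int)))) (out : Int) : Decidable (Spec_recommend_channel channel_usage out) := by unfold Spec_recommend_channel; infer_instance

-- ===== CLAIM (what is proved, stated in full; the proofs are below) =====
def Claim_equal_recommend_channel : Prop := ∀ (channel_usage : List (Int × List (List (String × Int)))), Dom_recommend_channel channel_usage → Pre_recommend_channel channel_usage → Spec_recommend_channel channel_usage (recommend_channel channel_usage)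

-- ===== LEMMAS AND PROOFS =====

-- pairwise sum step with a shifted accumulator
theorem foldl_pair_shift (g : Int → Int × Int) (L : List Int) (a v : Int × Int) :
    L.foldl (fun s c => (s.1 + (g c).1, s.2 + (g c).2)) (a.1 + v.1, a.2 + v.2)
      = ((L.foldl (fun s c => (s.1 + (g c).1, s.2 + (g c).2)) a).1 + v.1,
         (L.foldl (fun s c => (s.1 + (g c).1, s.2 + (g c).2)) a).2 + v.2) := by
  induction L generalizing a with
  | nil => rfl
  | cons c t ih =>
    simp only [List.foldl_cons]
    have := ih (a.1 + (g c).1, a.2 + (g c).2)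
    have h : ((a.1 + v.1) + (g c).1, (a.2 + v.2) + (g c).2)
        = ((a.1 + (g c).1) + v.1, (a.2 + (g c).2) + v.2) := by
      simp; constructor <;> ring
    rw [h, this]

-- a windowed fold over a Nodup list is unchanged by pointwise change at a key outside the list,
-- and gains exactly v at a key inside it whose old value is (0,0)
theorem foldl_window_congr (g g' : Int → Int × Int) (L : List Int)
    (h : ∀ c ∈ L, g' c = g c) (a : Int × Int) :
    L.foldl (fun s c => (s.1 + (g' c).1, s.2 + (g' c).2)) a
      = L.foldl (fun s c => (s.1 + (g c).1, s.2 + (g c).2)) a := by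
  induction L generalizing a with
  | nil => rfl
  | cons c t ih =>
    simp only [List.foldl_cons]
    rw [h c (by simp), ih (fun x hx => h x (by simp [hx]))]

theorem foldl_window_insert_point (g : Int → Int × Int) (L : List Int) (hL : L.Nodup)
    (k : Int) (v : Int × Int) (hg : g k = (0, 0)) (a : Int × Int) :
    L.foldl (fun s c => (s.1 + (if c = k then v else g c).1,
                         s.2 + (if c = k then v else g c).2)) a
      = if k ∈ L then
          ((L.foldl (fun s c => (s.1 + (g c).1, s.2 + (g c).2)) a).1 + v.1,
           (L.foldl (fun s c => (s.1 + (g c).1, s.2 + (g c).2)) a).2 + v.2)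
        else L.foldl (fun s c => (s.1 + (g c).1, s.2 + (g c).2)) a := by
  induction L generalizing a with
  | nil => simp
  | cons c t ih =>
    rcases List.nodup_cons.mp hL with ⟨hck, ht⟩
    by_cases hc : c = k
    · subst hc
      simp only [List.foldl_cons, List.mem_cons, true_or, hg, add_zero, if_pos]
      rw [foldl_window_congr (g := g)
            (g' := fun x => if x = c then v else g x)
            (h := fun x hx => by
              have : x ≠ c := fun h => hck (h ▸ hx)
              simp [this])]
      exact foldl_pair_shift g t a v
    · simp only [List.foldl_cons, if_neg hc]
      rw [ih ht]
      by_cases hk : k ∈ t <;> simp [hk, Ne.symm hc]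

-- the score-fold of A with a shifted accumulator
theorem scoreFor_foldl_shift (cu : List (Int × List (List (String × Int)))) (ch : Int)
    (a : Int × Int) :
    cu.foldl
      (fun acc p =>
        if |p.1 - ch| ≤ 4 then (acc.1 + (p.2.length : Int), acc.2 + sumSignal p.2) else acc) a
      = (a.1 + (scoreFor cu ch).1, a.2 + (scoreFor cu ch).2) := by
  induction cu generalizing a with
  | nil => simp [scoreFor]
  | cons p t ih =>
    simp only [scoreFor, List.foldl_cons]
    rw [ih, ih]
    by_cases hp : |p.1 - ch| ≤ 4 <;> simp [hp] <;> constructor <;> ring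

theorem windowScore_empty (ch : Int) : windowScore PySem.Dict.empty ch = (0, 0) := by
  unfold windowScore
  generalize PySem.List.pyRange (ch - 4) (ch + 5) 1 = L
  induction L with
  | nil => rfl
  | cons c t ih => simp only [List.foldl_cons]; exact ih

-- invariant of B's aggregation pass: the windowed score of the dict built so far is the
-- windowed score of the start dict plus A's filtered score of the processed entries
theorem windowScore_foldl_insert (cu : List (Int × List (List (String × Int))))
    (ch : Int) (d : PySem.Dict Int (Int × Int))
    (hnd : (cu.map Prod.fst).Nodup)
    (hfresh : ∀ p ∈ cu, d.contains p.1 = false) :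
    windowScore
        (cu.foldl (fun d p => d.insert p.1 ((p.2.length : Int), sumSignal p.2)) d) ch
      = ((windowScore d ch).1 + (scoreFor cu ch).1,
         (windowScore d ch).2 + (scoreFor cu ch).2) := by
  induction cu generalizing d with
  | nil => simp [scoreFor]
  | cons p t ih =>
    simp only [List.foldl_cons]
    have hnd' : (p.1 :: t.map Prod.fst).Nodup := by simpa using hnd
    rcases List.nodup_cons.mp hnd' with ⟨hpk, hndt⟩
    have hfresh' : ∀ q ∈ t, (d.insert p.1 ((p.2.length : Int), sumSignal p.2)).contains q.1 = false := by
      intro q hq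
      rw [PySem.Dict.contains_insert]
      have h1 : q.1 ≠ p.1 := fun h => hpk (h ▸ List.mem_map_of_mem (f := Prod.fst) hq)
      simp [h1, hfresh q (List.mem_cons_of_mem _ hq)]
    rw [ih (d.insert p.1 ((p.2.length : Int), sumSignal p.2)) hndt hfresh']
    have hins : windowScore (d.insert p.1 ((p.2.length : Int), sumSignal p.2)) ch
        = if |p.1 - ch| ≤ 4 then
            ((windowScore d ch).1 + (p.2.length : Int),
             (windowScore d ch).2 + sumSignal p.2)
          else windowScore d ch := by
      unfold windowScore
      have hge : ∀ c, (d.insert p.1 ((p.2.length : Int), sumSignal p.2)).getD c (0, 0)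
          = if c = p.1 then ((p.2.length : Int), sumSignal p.2) else d.getD c (0, 0) :=
        fun c => PySem.Dict.getD_insert d p.1 c ((p.2.length : Int), sumSignal p.2) (0, 0)
      simp only [hge]
      rw [foldl_window_insert_point (fun c => d.getD c (0, 0))
            (PySem.List.pyRange (ch - 4) (ch + 5) 1) (PySem.List.nodup_pyRange_one (ch - 4) (ch + 5))
            p.1 ((p.2.length : Int), sumSignal p.2)
            (PySem.Dict.getD_of_not_contains d (0, 0) (hfresh p List.mem_cons_self))]
      have hmem : p.1 ∈ PySem.List.pyRange (ch - 4) (ch + 5) 1 ↔ |p.1 - ch| ≤ 4 := by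
        rw [PySem.List.mem_pyRange_one, abs_le]; omega
      by_cases hp : |p.1 - ch| ≤ 4 <;> simp [hmem, hp]
    rw [hins]
    have hsc : scoreFor (p :: t) ch
        = ((if |p.1 - ch| ≤ 4 then ((0:Int) + (p.2.length : Int), (0:Int) + sumSignal p.2)
            else ((0:Int), (0:Int))).1 + (scoreFor t ch).1,
           (if |p.1 - ch| ≤ 4 then ((0:Int) + (p.2.length : Int), (0:Int) + sumSignal p.2)
            else ((0:Int), (0:Int))).2 + (scoreFor t ch).2) := by
      simp only [scoreFor, List.foldl_cons]
      rw [scoreFor_foldl_shift]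
      simp [scoreFor]
    rw [hsc]
    by_cases hp : |p.1 - ch| ≤ 4 <;> simp only [hp, if_true, if_false] <;>
      refine Prod.ext ?_ ?_ <;> simp <;> ring

theorem windowScore_aggOf (cu : List (Int × List (List (String × Int))))
    (ch : Int) (hnd : (cu.map Prod.fst).Nodup) :
    windowScore (aggOf cu) ch = scoreFor cu ch := by
  unfold aggOf
  rw [windowScore_foldl_insert cu ch PySem.Dict.empty hnd
        (fun p _ => PySem.Dict.contains_empty p.1)]
  simp [windowScore_empty]

-- the unrolled min over the three (count, sig, ch) triples equals A's min-by-key over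
-- [1, 6, 11]: the tuple order is lexicographic and the distinct channel components only
-- break ties the same way list order does in A
theorem pick3_eq (s1 s6 s11 : Int × Int) :
    ((if lex3Lt ((s11.1, s11.2, 11) : Int × Int × Int)
          (if lex3Lt ((s6.1, s6.2, 6) : Int × Int × Int) ((s1.1, s1.2, 1) : Int × Int × Int)
           then ((s6.1, s6.2, 6) : Int × Int × Int) else ((s1.1, s1.2, 1) : Int × Int × Int))
      then ((s11.1, s11.2, 11) : Int × Int × Int)
      else (if lex3Lt ((s6.1, s6.2, 6) : Int × Int × Int) ((s1.1, s1.2, 1) : Int × Int × Int)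
            then ((s6.1, s6.2, 6) : Int × Int × Int)
            else ((s1.1, s1.2, 1) : Int × Int × Int))).2.2) = pickMin s1 s6 s11 := by
  simp only [lex3Lt, pickMin, lexLt]
  split_ifs <;> simp_all

-- ===== VERDICT (by name: the statement is the Claim_ definition above) =====
theorem recommend_channel_spec : Claim_equal_recommend_channel := by
  intro cu _ hpre
  show recommend_channel cu = recommend_channel_alt cu
  simp only [recommend_channel, recommend_channel_alt,
    windowScore_aggOf cu 1 hpre.1, windowScore_aggOf cu 6 hpre.1,
    windowScore_aggOf cu 11 hpre.1]
  exact (pick3_eq (scoreFor cu 1) (scoreFor cu 6) (scoreFor cu 11)).symm
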